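-- pv_equiv track=rewrite | github.com/cmiley/cs691ml | cayler_miley_project1_691/clustering.py | centers_converged
-- ===== SOURCE A (Python) =====
-- def centers_converged(center_counts):
--     if not center_counts:
--         return -1
--     total_count = 0
--     max_count = 0
--     max_index = -1
--
--     for index, (center, count) in enumerate(center_counts):
--         total_count += count
--         if count > max_count:
--             max_index = index
--             max_count = count
--
--     # must run more than 10 trials
--     if total_count < 10:
--         return -1
--
--     if max_count / total_count >= 0.5:
--         return max_index
--
--     # stop running beyond 1000 trials
--     if total_count > 999:
--         return max_index
--
--     return -1
-- ===== SOURCE B (Python) =====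
-- def centers_converged(center_counts):
--     total = sum(count for _, count in center_counts)
--     # fewer than 10 trials recorded: not converged
--     if total < 10:
--         return -1
--     # rank centers by count, descending; stable sort keeps the earliest index first on ties
--     ranked = sorted(range(len(center_counts)), key=lambda i: -center_counts[i][1])
--     winner = ranked[0]
--     if 2 * center_counts[winner][1] >= total or total > 999:
--         return winner
--     return -1
-- ===== Notes on version B (the rewrite author's own statement) =====
-- stated objective: alternative
-- what changed: A's single fused loop that simultaneously accumulates the total and tracks the running max with its first index is replaced by a builtin sum plus a sort-then-pick selection: the indices are sorted by descending count (the stable sort resolving ties to the earliest index) and the winner is the first element of that ranking, with the positive-only max_index tracking made unnecessary because total >= 10 guarantees a positive maximum.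
import Mathlib
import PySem

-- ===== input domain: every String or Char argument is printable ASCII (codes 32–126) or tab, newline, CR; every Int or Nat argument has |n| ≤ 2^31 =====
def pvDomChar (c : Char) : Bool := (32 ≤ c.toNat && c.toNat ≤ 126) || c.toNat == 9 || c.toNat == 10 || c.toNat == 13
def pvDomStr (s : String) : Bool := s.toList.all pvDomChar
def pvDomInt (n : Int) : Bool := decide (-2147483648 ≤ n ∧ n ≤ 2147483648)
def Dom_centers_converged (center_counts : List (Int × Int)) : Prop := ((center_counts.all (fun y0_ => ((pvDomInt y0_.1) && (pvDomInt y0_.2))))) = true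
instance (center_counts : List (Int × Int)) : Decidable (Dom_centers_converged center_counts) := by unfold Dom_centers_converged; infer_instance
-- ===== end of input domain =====

-- B replaces A's fused accumulate-and-track loop by a builtin sum plus a sort of the indices by
-- descending count (stable, so the earliest index wins ties) from which the winner is the first
-- element; the ratio test max_count/total_count >= 0.5 is rendered exactly as 2*count >= total
-- (exact at Dom's magnitudes). Objective: alternative (sort-then-pick, not faster).

-- ===== PORT A =====
-- A's loop body: state (total_count, max_count, max_index)
def pvStepA (st : Int × Int × Int) (p : Int × (Int × Int)) : Int × Int × Int :=
  let total := st.1 + p.2.2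
  if p.2.2 > st.2.1 then (total, p.2.2, p.1) else (total, st.2.1, st.2.2)

def centers_converged (center_counts : List (Int × Int)) : Int :=
  if center_counts = [] then -1
  else
    let s := (PySem.List.enumerate center_counts 0).foldl pvStepA (0, 0, -1)
    if s.1 < 10 then -1
    else if 2 * s.2.1 ≥ s.1 then s.2.2
    else if s.1 > 999 then s.2.2
    else -1

-- ===== PORT B =====
def centers_converged_alt (center_counts : List (Int × Int)) : Int :=
  let total := (center_counts.map (fun p => p.2)).sum
  if total < 10 then -1
  else
    let ranked := PySem.List.sorted (List.range center_counts.length)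
        (fun (i : Nat) => -(PySem.List.pyGetD center_counts (i : Int) ((0 : Int), (0 : Int))).2) false
    match ranked with
    | [] => -1   -- unreachable: total ≥ 10 forces center_counts ≠ []
    | w :: _ =>
      if 2 * (PySem.List.pyGetD center_counts (w : Int) ((0 : Int), (0 : Int))).2 ≥ total ∨ total > 999
      then (w : Int) else -1

-- ===== PRECONDITION & SPEC =====
def Spec_centers_converged (center_counts : List (Int × Int)) (out : Int) : Prop := out = centers_converged_alt center_counts
instance (center_counts : List (Int × Int)) (out : Int) : Decidable (Spec_centers_converged center_counts out) := by unfold Spec_centers_converged; infer_instance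

-- ===== CLAIM (what is proved, stated in full; the proofs are below) =====
def Claim_equal_centers_converged : Prop := ∀ (center_counts : List (Int × Int)), Dom_centers_converged center_counts → Spec_centers_converged center_counts (centers_converged center_counts)

-- ===== LEMMAS AND PROOFS =====

lemma foldA_total (l : List (Int × Int)) : ∀ (k t m i : Int),
    ((PySem.List.enumerate l k).foldl pvStepA (t, m, i)).1 = t + (l.map (fun p => p.2)).sum := by
  induction l with
  | nil => intro k t m i; simp [PySem.List.enumerate_nil]
  | cons h tl ih =>
    intro k t m i
    simp only [PySem.List.enumerate_cons, List.foldl_cons, List.map_cons, List.sum_cons, pvStepA]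
    split_ifs <;> simp [ih] <;> ring

lemma foldA_max (l : List (Int × Int)) : ∀ (k t m i : Int),
    ((PySem.List.enumerate l k).foldl pvStepA (t, m, i)).2.1 = (l.map (fun p => p.2)).foldl max m := by
  induction l with
  | nil => intro k t m i; simp [PySem.List.enumerate_nil]
  | cons h tl ih =>
    intro k t m i
    simp only [PySem.List.enumerate_cons, List.foldl_cons, List.map_cons, pvStepA]
    split_ifs with hgt
    · rw [ih, max_eq_right (le_of_lt hgt)]
    · rw [ih, max_eq_left (by omega)]

-- fold keeps (m,i) when nothing exceeds m
lemma foldA_snd_of_le (l : List (Int × Int)) : ∀ (k t m i : Int),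
    (∀ c ∈ l.map (fun p => p.2), c ≤ m) →
    ((PySem.List.enumerate l k).foldl pvStepA (t, m, i)).2 = (m, i) := by
  induction l with
  | nil => intro k t m i _; simp [PySem.List.enumerate_nil]
  | cons h tl ih =>
    intro k t m i hle
    have hh : h.2 ≤ m := hle h.2 (by simp)
    simp only [PySem.List.enumerate_cons, List.foldl_cons, pvStepA]
    rw [if_neg (by omega)]
    exact ih (k+1) (t + h.2) m i (fun c hc => hle c (by simp at hc ⊢; right; exact hc))

-- A's index component: when some count exceeds m, the final index is k + r where r is the
-- first position whose count equals the final max, every earlier position being strictly smaller.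
lemma foldA_idx (l : List (Int × Int)) : ∀ (k t m i : Int),
    (∃ c ∈ l.map (fun p => p.2), m < c) →
    ∃ r : Nat, r < l.length ∧
      ((PySem.List.enumerate l k).foldl pvStepA (t, m, i)).2.2 = k + (r : Int) ∧
      (l.map (fun p => p.2)).getD r 0 = ((PySem.List.enumerate l k).foldl pvStepA (t, m, i)).2.1 ∧
      ∀ q, q < r → (l.map (fun p => p.2)).getD q 0 < ((PySem.List.enumerate l k).foldl pvStepA (t, m, i)).2.1 := by
  induction l with
  | nil => intro k t m i hex; simp at hex
  | cons h tl ih =>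
    intro k t m i hex
    simp only [PySem.List.enumerate_cons, List.foldl_cons, List.map_cons, pvStepA]
    set cs := tl.map (fun p => p.2) with hcs
    by_cases hgt : h.2 > m
    · rw [if_pos hgt]
      by_cases hex2 : ∃ c ∈ cs, h.2 < c
      · obtain ⟨r', hr', hI, hget, hlt⟩ := ih (k+1) (t + h.2) h.2 k hex2
        have hMgt : h.2 < ((PySem.List.enumerate tl (k+1)).foldl pvStepA (t + h.2, h.2, k)).2.1 := by
          rw [foldA_max]
          obtain ⟨c, hc, hltc⟩ := hex2
          exact lt_of_lt_of_le hltc ((PySem.List.le_foldl_max cs h.2).2 c hc)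
        refine ⟨r' + 1, by simpa using hr', by rw [hI]; push_cast; ring, by simpa using hget, ?_⟩
        intro q hq
        cases q with
        | zero => simpa using hMgt
        | succ q' => simpa using hlt q' (by omega)
      · rw [not_exists] at hex2
        simp only [not_and, not_lt] at hex2
        have hsnd := foldA_snd_of_le tl (k+1) (t + h.2) h.2 k (by simpa [hcs] using hex2)
        refine ⟨0, by simp, ?_, ?_, by omega⟩
        · rw [show ((PySem.List.enumerate tl (k+1)).foldl pvStepA (t + h.2, h.2, k)).2.2
              = ((PySem.List.enumerate tl (k+1)).foldl pvStepA (t + h.2, h.2, k)).2.2 from rfl,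
              show ((PySem.List.enumerate tl (k+1)).foldl pvStepA (t + h.2, h.2, k)).2.2 = k from by rw [hsnd]]
          simp
        · have : ((PySem.List.enumerate tl (k+1)).foldl pvStepA (t + h.2, h.2, k)).2.1 = h.2 := by rw [hsnd]
          simpa using this.symm
    · rw [if_neg hgt]
      have hex2 : ∃ c ∈ cs, m < c := by
        obtain ⟨c, hc, hltc⟩ := hex
        simp only [List.map_cons, List.mem_cons] at hc
        rcases hc with rfl | hc
        · omega
        · exact ⟨c, hc, hltc⟩
      obtain ⟨r', hr', hI, hget, hlt⟩ := ih (k+1) (t + h.2) m i hex2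
      have hMgt : m < ((PySem.List.enumerate tl (k+1)).foldl pvStepA (t + h.2, m, i)).2.1 := by
        rw [foldA_max]
        obtain ⟨c, hc, hltc⟩ := hex2
        exact lt_of_lt_of_le hltc ((PySem.List.le_foldl_max cs m).2 c hc)
      refine ⟨r' + 1, by simpa using hr', by rw [hI]; push_cast; ring, by simpa using hget, ?_⟩
      intro q hq
      cases q with
      | zero => simp only [List.getD_cons_zero]; omega
      | succ q' => simpa using hlt q' (by omega)

lemma sum_pos_exists (l : List Int) : 0 < l.sum → ∃ c ∈ l, 0 < c := by
  induction l with
  | nil => simp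
  | cons h tl ih =>
    intro hpos
    simp only [List.sum_cons] at hpos
    by_cases hh : 0 < h
    · exact ⟨h, by simp, hh⟩
    · obtain ⟨c, hc, hcpos⟩ := ih (by omega)
      exact ⟨c, by simp [hc], hcpos⟩

-- head of the insertion used by PySem.List.sorted
lemma head_insertBy {α : Type} (before : α → α → Bool) (x a : α) (t : List α) :
    ∃ t', PySem.List.insertBy before x (a :: t) = (if before x a then x else a) :: t' := by
  by_cases h : before x a
  · exact ⟨a :: t, by simp [PySem.List.insertBy, h]⟩
  · exact ⟨PySem.List.insertBy before x t, by simp [PySem.List.insertBy, h]⟩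

-- head of the insertion-sort fold = first-strict-min scan over the input
lemma head_foldl_insertBy {α : Type} (before : α → α → Bool) (xs : List α) : ∀ (a : α) (t : List α),
    ∃ t', xs.foldl (fun acc x => PySem.List.insertBy before x acc) (a :: t)
      = (xs.foldl (fun h x => if before x h then x else h) a) :: t' := by
  induction xs with
  | nil => intro a t; exact ⟨t, rfl⟩
  | cons x xs ih =>
    intro a t
    obtain ⟨t', ht'⟩ := head_insertBy before x a t
    simp only [List.foldl_cons, ht']
    exact ih _ t'

-- head of sorted = first-strict-min scan over the whole input
lemma head_sorted {α : Type} (before : α → α → Bool) (x0 : α) (xs : List α) :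
    ∃ t', (x0 :: xs).foldl (fun acc x => PySem.List.insertBy before x acc) []
      = (xs.foldl (fun h x => if before x h then x else h) x0) :: t' := by
  simp only [List.foldl_cons]
  rw [show PySem.List.insertBy before x0 [] = [x0] from rfl]
  exact head_foldl_insertBy before xs x0 []

-- first-strict-max scan over a contiguous index range: invariant form
lemma scan_range_inv (f : Nat → Int) : ∀ (len a h : Nat), h < a →
    (∀ i, i < a → f i ≤ f h) → (∀ i, i < h → f i < f h) →
    (List.range' a len).foldl (fun h x => if f h < f x then x else h) h < a + len ∧
    (∀ i, i < a + len → f i ≤ f ((List.range' a len).foldl (fun h x => if f h < f x then x else h) h)) ∧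
    (∀ i, i < (List.range' a len).foldl (fun h x => if f h < f x then x else h) h →
      f i < f ((List.range' a len).foldl (fun h x => if f h < f x then x else h) h)) := by
  intro len
  induction len with
  | zero =>
    intro a h hha hle hlt
    simpa using ⟨hha, fun i hi => hle i hi, hlt⟩
  | succ len ih =>
    intro a h hha hle hlt
    rw [List.range'_succ, List.foldl_cons]
    by_cases hup : f h < f a
    · rw [if_pos hup]
      have := ih (a+1) a (by omega)
        (fun i hi => by rcases Nat.lt_succ_iff_lt_or_eq.mp hi with hi | rfl
                        · exact le_of_lt (lt_of_le_of_lt (hle i hi) hup)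
                        · exact le_refl _)
        (fun i hi => lt_of_le_of_lt (hle i hi) hup)
      refine ⟨by omega, fun i hi => (this.2.1) i (by omega), this.2.2⟩
    · rw [if_neg hup]
      have := ih (a+1) h (by omega)
        (fun i hi => by rcases Nat.lt_succ_iff_lt_or_eq.mp hi with hi | rfl
                        · exact hle i hi
                        · omega)
        hlt
      refine ⟨by omega, fun i hi => (this.2.1) i (by omega), this.2.2⟩

-- (map snd).getD through the pair getD used by the B port
lemma getD_map_snd (cc : List (Int × Int)) (i : Nat) :
    (cc.getD i ((0 : Int), (0 : Int))).2 = (cc.map (fun p => p.2)).getD i 0 := by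
  by_cases h : i < cc.length
  · rw [List.getD_eq_getElem _ _ h, List.getD_eq_getElem _ _ (by simpa using h)]
    simp
  · rw [List.getD_eq_default _ _ (by omega), List.getD_eq_default _ _ (by simpa using not_lt.mp h)]

-- ===== VERDICT (by name: the statement is the Claim_ definition above) =====
theorem centers_converged_spec : Claim_equal_centers_converged := by
  intro cc _
  unfold Spec_centers_converged centers_converged centers_converged_alt
  simp only
  set counts := cc.map (fun p => p.2) with hcounts
  set f : Nat → Int := fun i => counts.getD i 0 with hf
  by_cases htot : counts.sum < 10
  · -- total < 10: both sides return -1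
    by_cases hnil : cc = []
    · simp [hnil, hcounts]
    · rw [if_neg hnil]
      rw [if_pos (by rw [foldA_total]; simpa [← hcounts] using htot)]
      rw [if_pos htot]
  · -- total ≥ 10: the list is nonempty and its max is positive
    have hpos : 0 < counts.sum := by omega
    obtain ⟨c, hcmem, hc⟩ := sum_pos_exists counts hpos
    have hcnil : counts ≠ [] := by intro h; rw [h] at hcmem; simp at hcmem
    have hnil : cc ≠ [] := by intro h; rw [hcounts, h] at hcnil; simp at hcnil
    have hlen : counts.length = cc.length := by rw [hcounts]; simp
    obtain ⟨nn, hnn⟩ : ∃ nn, cc.length = nn + 1 :=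
      ⟨cc.length - 1, by have := List.length_pos_iff.mpr hnil; omega⟩
    rw [if_neg hnil, if_neg htot]
    -- A's state
    have hA := foldA_idx cc 0 0 0 (-1) ⟨c, by simpa [← hcounts] using hcmem, hc⟩
    rw [← hcounts] at hA
    obtain ⟨rA, hrA, hAI, hAget, hAlt⟩ := hA
    set M := ((PySem.List.enumerate cc 0).foldl pvStepA (0, 0, -1)).2.1 with hMdef
    have hAmax : ∀ i, i < cc.length → f i ≤ M := by
      intro i hi
      have hi' : i < counts.length := by omega
      have hfi : f i = counts[i] := List.getD_eq_getElem counts 0 hi'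
      rw [hMdef, foldA_max, ← hcounts, hfi]
      exact (PySem.List.le_foldl_max counts 0).2 _ (List.getElem_mem hi')
    -- B's winner: head of the stable sort = first-strict-max scan over the indices
    have hrange : List.range cc.length = 0 :: List.range' 1 nn := by
      rw [hnn, List.range_eq_range', List.range'_succ]
    obtain ⟨tB, htB⟩ := head_sorted
      (fun a b => decide ((fun (i : Nat) => -(PySem.List.pyGetD cc (i : Int) ((0:Int),(0:Int))).2) a
        < (fun (i : Nat) => -(PySem.List.pyGetD cc (i : Int) ((0:Int),(0:Int))).2) b))
      0 (List.range' 1 nn)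
    have hsortedeq : PySem.List.sorted (List.range cc.length)
        (fun (i : Nat) => -(PySem.List.pyGetD cc (i : Int) ((0:Int),(0:Int))).2) false
        = ((List.range' 1 nn).foldl (fun h x => if f h < f x then x else h) 0) :: tB := by
      have hunf : PySem.List.sorted (List.range cc.length)
          (fun (i : Nat) => -(PySem.List.pyGetD cc (i : Int) ((0:Int),(0:Int))).2) false
          = (List.range cc.length).foldl (fun acc x => PySem.List.insertBy
              (fun a b => decide ((fun (i : Nat) => -(PySem.List.pyGetD cc (i : Int) ((0:Int),(0:Int))).2) a
                < (fun (i : Nat) => -(PySem.List.pyGetD cc (i : Int) ((0:Int),(0:Int))).2) b)) x acc) [] := rfl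
      rw [hunf, hrange, htB]
      congr 1
      apply PySem.List.foldl_congr_mem
      intro acc x _
      simp only [decide_eq_true_eq, PySem.List.pyGetD_natCast, getD_map_snd, ← hcounts, hf]
      split_ifs <;> first | rfl | omega
    set w := (List.range' 1 nn).foldl (fun h x => if f h < f x then x else h) 0 with hw
    have hscan := scan_range_inv f nn 1 0 (by omega) (fun i hi => by interval_cases i; exact le_refl _)
      (fun i hi => by omega)
    rw [← hw] at hscan
    obtain ⟨hwlt, hwmax, hwfirst⟩ := hscan
    have hwn : w < cc.length := by omega
    -- f w = M
    have hfwM : f w = M := by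
      have h1 : f w ≤ M := hAmax w hwn
      have h2 : M ≤ f w := by
        rw [hMdef, foldA_max, ← hcounts]
        rcases PySem.List.foldl_max_mem counts 0 with heq | hmem
        · rw [heq]
          have hcle : c ≤ counts.foldl max 0 := (PySem.List.le_foldl_max counts 0).2 c hcmem
          rw [heq] at hcle; omega
        · obtain ⟨i, hi, hieq⟩ := List.mem_iff_getElem.mp hmem
          rw [← hieq]
          have hfieq : f i = counts[i] := List.getD_eq_getElem counts 0 hi
          rw [← hfieq]
          exact hwmax i (by omega)
      omega
    -- rA = w by uniqueness of the first max position
    have hAget' : f rA = M := hAget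
    have hrAw : rA = w := by
      rcases lt_trichotomy rA w with hlt | heq | hgt
      · have := hwfirst rA hlt; rw [hAget', hfwM] at this; omega
      · exact heq
      · have hthis : f w < M := hAlt w hgt
        rw [hfwM] at hthis; omega
    -- totals agree
    have hAtot : ((PySem.List.enumerate cc 0).foldl pvStepA (0, 0, -1)).1 = counts.sum := by
      rw [foldA_total, ← hcounts]; ring
    rw [hsortedeq]
    simp only [PySem.List.pyGetD_natCast, getD_map_snd, ← hcounts]
    have hgw : counts.getD w 0 = M := hfwM
    rw [hAtot, hAI, hrAw, hgw, if_neg htot]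
    split_ifs <;> first | rfl | omega
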